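-- pv_equiv track=rewrite | github.com/romtrost/Question-Word-Prediction | qwp.py | pruning_mask
-- ===== SOURCE A (Python) =====
-- def pruning_mask(question_phrase, freq_words):
--     pruned, qw = [], []
--     for word, tag in question_phrase.items():
--         if not qw and "W" in tag or len(qw) == 1 and "J" in tag and word in freq_words:
--             qw.append(word)
--         elif qw:
--             pruned.append(word)
--     return qw, pruned
-- ===== SOURCE B (Python) =====
-- def pruning_mask(question_phrase, freq_words):
--     items = list(question_phrase.items())
--     qi = None
--     for i, (word, tag) in enumerate(items):
--         if "W" in tag:
--             qi = i
--             break
--     if qi is None: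
--         return [], []
--     qw = [items[qi][0]]
--     pruned = []
--     found_j = False
--     for word, tag in items[qi + 1:]:
--         if not found_j and "J" in tag and word in freq_words:
--             qw.append(word)
--             found_j = True
--         else:
--             pruned.append(word)
--     return qw, pruned
-- ===== Notes on version B (the rewrite author's own statement) =====
-- stated objective: alternative
-- what changed: Replaces A's single fold over a 3-state accumulator (length of qw encodes the phase) with an explicit two-phase decomposition: find the first W-tagged word, then scan only the tail with a boolean flag for the single liftable J-word.
import Mathlib
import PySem

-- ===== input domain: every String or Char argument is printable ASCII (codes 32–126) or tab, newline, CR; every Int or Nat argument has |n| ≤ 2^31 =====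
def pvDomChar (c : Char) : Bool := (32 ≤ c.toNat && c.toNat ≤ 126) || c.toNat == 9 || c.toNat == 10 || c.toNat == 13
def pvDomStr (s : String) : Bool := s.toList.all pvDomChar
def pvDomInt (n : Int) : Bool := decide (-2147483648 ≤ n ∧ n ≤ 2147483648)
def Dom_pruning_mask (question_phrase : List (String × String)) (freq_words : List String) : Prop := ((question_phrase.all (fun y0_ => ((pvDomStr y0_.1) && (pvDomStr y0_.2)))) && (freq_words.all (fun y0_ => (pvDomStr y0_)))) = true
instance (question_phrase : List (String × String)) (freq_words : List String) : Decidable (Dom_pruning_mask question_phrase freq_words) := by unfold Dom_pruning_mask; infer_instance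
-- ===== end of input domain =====

-- B differs from A by decomposition only (two-phase scan vs one fold); return values are equal on all inputs.

-- ===== PORT A =====
-- A: one pass over the items, accumulating (pruned, qw); the condition's precedence is
-- (not qw and "W" in tag) or (len(qw)==1 and "J" in tag and word in freq_words).
def pruning_mask (question_phrase : List (String × String)) (freq_words : List String) : List String × List String :=
  let st := question_phrase.foldl (fun (st : List String × List String) wt =>
    let pruned := st.1
    let qw := st.2
    if (qw.isEmpty && PySem.Str.isIn "W" wt.2) ||
       ((qw.length == 1) && PySem.Str.isIn "J" wt.2 && freq_words.contains wt.1) then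
      (pruned, qw ++ [wt.1])
    else if !qw.isEmpty then
      (pruned ++ [wt.1], qw)
    else
      (pruned, qw)) ([], [])
  (st.2, st.1)

-- ===== PORT B =====
-- B phase 1: first W-tagged word, returning it with the remaining items.
def pmFindW : List (String × String) → Option (String × List (String × String))
  | [] => none
  | wt :: rest => if PySem.Str.isIn "W" wt.2 then some (wt.1, rest) else pmFindW rest

-- B phase 2: tail scan with the found_j flag; returns (extra qw words, pruned).
def pmTail (freq_words : List String) : List (String × String) → Bool → List String × List String
  | [], _ => ([], [])
  | wt :: rest, foundJ =>
    if !foundJ && PySem.Str.isIn "J" wt.2 && freq_words.contains wt.1 then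
      let r := pmTail freq_words rest true
      (wt.1 :: r.1, r.2)
    else
      let r := pmTail freq_words rest foundJ
      (r.1, wt.1 :: r.2)

def pruning_mask_alt (question_phrase : List (String × String)) (freq_words : List String) : List String × List String :=
  match pmFindW question_phrase with
  | none => ([], [])
  | some (w, rest) =>
    let r := pmTail freq_words rest false
    (w :: r.1, r.2)

-- ===== PRECONDITION & SPEC =====
def Spec_pruning_mask (question_phrase : List (String × String)) (freq_words : List String) (out : List String × List String) : Prop := out = pruning_mask_alt question_phrase freq_words
instance (question_phrase : List (String × String)) (freq_words : List String) (out : List String × List String) : Decidable (Spec_pruning_mask question_phrase freq_words out) := by unfold Spec_pruning_mask; infer_instance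

-- ===== CLAIM (what is proved, stated in full; the proofs are below) =====
def Claim_equal_pruning_mask : Prop := ∀ (question_phrase : List (String × String)) (freq_words : List String), Dom_pruning_mask question_phrase freq_words → Spec_pruning_mask question_phrase freq_words (pruning_mask question_phrase freq_words)

-- ===== LEMMAS AND PROOFS =====

-- abbreviation for A's loop body
def pmStep (freq_words : List String) (st : List String × List String) (wt : String × String) : List String × List String :=
  let pruned := st.1
  let qw := st.2
  if (qw.isEmpty && PySem.Str.isIn "W" wt.2) ||
     ((qw.length == 1) && PySem.Str.isIn "J" wt.2 && freq_words.contains wt.1) then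
    (pruned, qw ++ [wt.1])
  else if !qw.isEmpty then
    (pruned ++ [wt.1], qw)
  else
    (pruned, qw)

theorem pruning_mask_eq_foldl (qp : List (String × String)) (fw : List String) :
    pruning_mask qp fw = ((qp.foldl (pmStep fw) ([], [])).2, (qp.foldl (pmStep fw) ([], [])).1) := by
  rfl

-- phase 3 (qw already has two words): everything is pruned
theorem foldl_two (fw : List String) (l : List (String × String)) (p : List String) (a b : String) :
    l.foldl (pmStep fw) (p, [a, b]) = (p ++ l.map Prod.fst, [a, b]) := by
  induction l generalizing p with
  | nil => simp
  | cons wt rest ih => simp [pmStep, ih]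

theorem pmTail_true (fw : List String) (l : List (String × String)) :
    pmTail fw l true = ([], l.map Prod.fst) := by
  induction l with
  | nil => rfl
  | cons wt rest ih => simp [pmTail, ih]

-- phase 2: from a one-word qw state, A's fold computes pmTail on the rest
theorem foldl_one (fw : List String) (l : List (String × String)) (p : List String) (a : String) :
    l.foldl (pmStep fw) (p, [a]) =
      (p ++ (pmTail fw l false).2, a :: (pmTail fw l false).1) := by
  induction l generalizing p with
  | nil => simp [pmTail]
  | cons wt rest ih =>
    by_cases h : PySem.Chars.isIn ['J'] wt.2.toList = true ∧ wt.1 ∈ fw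
    · simp [pmStep, pmTail, h, foldl_two, pmTail_true]
    · simp [pmStep, pmTail, h, ih]

-- phase 1: from the empty state, A's fold computes B
theorem foldl_zero (fw : List String) (l : List (String × String)) :
    l.foldl (pmStep fw) ([], []) =
      ((pruning_mask_alt l fw).2, (pruning_mask_alt l fw).1) := by
  induction l with
  | nil => rfl
  | cons wt rest ih =>
    by_cases h : PySem.Chars.isIn ['W'] wt.2.toList = true
    · simp [pmStep, h, pruning_mask_alt, pmFindW, foldl_one]
    · simp only [pmStep, List.foldl_cons]
      rw [show ((([] : List String).isEmpty && PySem.Str.isIn "W" wt.2) ||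
            ((([] : List String).length == 1) && PySem.Str.isIn "J" wt.2 && fw.contains wt.1)) = false by
        simp [h]]
      simp only [Bool.false_eq_true, if_false, List.isEmpty_nil, Bool.not_true]
      rw [ih]
      simp [pruning_mask_alt, pmFindW, h]

-- ===== VERDICT (by name: the statement is the Claim_ definition above) =====
theorem pruning_mask_spec : Claim_equal_pruning_mask := by
  intro qp fw _
  show _ = _
  rw [pruning_mask_eq_foldl, foldl_zero]
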